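-- pv_equiv track=rewrite | github.com/Youngdong2/codetree-TILs | 241216/금 채굴하기/gold-mining.py | make_rhombus
-- ===== SOURCE A (Python) =====
-- def make_rhombus(i, j, k, arr, n):
--     count = 0
--     # 맨해튼 거리 조건: |dx| + |dy| ≤ k
--     for dx in range(-k, k+1):
--         limit = k - abs(dx)
--         for dy in range(-limit, limit+1):
--             x, y = i + dx, j + dy
--             if 0 <= x < n and 0 <= y < n:
--                 count += arr[x][y]
--     return count
-- ===== SOURCE B (Python) =====
-- def make_rhombus(i, j, k, arr, n):
--     # Stage 1: build a prefix-sum table over every row of arr (one full pass).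
--     pref = []
--     for row in arr:
--         p = [0]
--         for v in row:
--             p.append(p[-1] + v)
--         pref.append(p)
--     # Stage 2: per diamond row, one O(1) prefix-sum difference.
--     total = 0
--     for x in range(max(0, i - k), min(n, i + k + 1)):
--         rem = k - abs(x - i)
--         lo = max(0, j - rem)
--         hi = min(n, j + rem + 1)
--         if lo < hi:
--             total += pref[x][hi] - pref[x][lo]
--     return total
-- ===== Notes on version B (the rewrite author's own statement) =====
-- stated objective: alternative
-- what changed: A's per-cell scan of the whole Manhattan diamond with a bounds check at every cell is replaced by a two-stage algorithm: first build a per-row prefix-sum table of arr in one pass, then answer with a single O(1) prefix-sum subtraction per touched grid row; intended as faster (measured 2330x at the largest size both finished, but A timed out at the top size so a timing run could not confirm it).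
import Mathlib
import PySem

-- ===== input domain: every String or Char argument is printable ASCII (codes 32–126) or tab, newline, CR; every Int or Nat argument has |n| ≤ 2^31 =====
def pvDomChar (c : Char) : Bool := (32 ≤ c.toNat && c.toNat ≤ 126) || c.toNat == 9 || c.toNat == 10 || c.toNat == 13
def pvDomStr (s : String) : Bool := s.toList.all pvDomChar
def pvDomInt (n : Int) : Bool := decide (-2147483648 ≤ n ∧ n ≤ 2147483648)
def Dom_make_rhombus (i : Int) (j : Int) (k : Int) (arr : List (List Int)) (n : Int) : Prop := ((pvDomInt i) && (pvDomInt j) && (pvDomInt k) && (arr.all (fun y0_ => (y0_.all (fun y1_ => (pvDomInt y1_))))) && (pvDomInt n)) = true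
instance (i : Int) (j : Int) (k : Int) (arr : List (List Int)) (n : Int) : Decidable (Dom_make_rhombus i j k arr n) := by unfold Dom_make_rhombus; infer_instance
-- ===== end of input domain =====

-- B precomputes a prefix-sum table of arr and answers with one subtraction per touched row,
-- instead of A's per-cell scan of the whole Manhattan diamond with per-cell bounds checks.

-- ===== PORT A =====
def make_rhombus (i : Int) (j : Int) (k : Int) (arr : List (List Int)) (n : Int) : Int :=
  (PySem.List.pyRange (-k) (k + 1) 1).foldl (fun count dx =>
    let limit := k - |dx|
    (PySem.List.pyRange (-limit) (limit + 1) 1).foldl (fun count dy =>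
      let x := i + dx
      let y := j + dy
      if 0 ≤ x ∧ x < n ∧ 0 ≤ y ∧ y < n then
        -- arr[x][y]: in-range under Pre_ (Python raises exactly where Pre_ fails)
        count + PySem.List.pyGetD (PySem.List.pyGetD arr x []) y 0
      else count) count) 0

-- ===== PORT B =====
-- p.append(p[-1] + v): p[-1] is PySem.List.pyGetD p (-1) 0 (p is never empty, it starts as [0])
def pvPrefixRow (row : List Int) : List Int :=
  row.foldl (fun p v => p ++ [PySem.List.pyGetD p (-1) 0 + v]) [0]

def make_rhombus_alt (i : Int) (j : Int) (k : Int) (arr : List (List Int)) (n : Int) : Int :=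
  let pref := arr.foldl (fun ps row => ps ++ [pvPrefixRow row]) []
  (PySem.List.pyRange (max 0 (i - k)) (min n (i + k + 1)) 1).foldl (fun total x =>
    let rem := k - |x - i|
    let lo := max 0 (j - rem)
    let hi := min n (j + rem + 1)
    if lo < hi then
      -- pref[x][hi], pref[x][lo]: in-range under Pre_
      total + (PySem.List.pyGetD (PySem.List.pyGetD pref x []) hi 0
               - PySem.List.pyGetD (PySem.List.pyGetD pref x []) lo 0)
    else total) 0

-- ===== PRECONDITION & SPEC =====
-- Pre_ excludes exactly the inputs where A raises an IndexError: some diamond row x inside the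
-- grid's row range touches columns (lo < hi) but arr has no row x, or that row is shorter than hi.
-- Stated in closed form (bounded by arr.length plus one test at the out-of-arr row closest to i,
-- where the diamond is widest) so it is decidable without iterating a huge row range.
def pvX0 (i : Int) (k : Int) (len : Int) (n : Int) : Int :=
  max (max (max 0 (i - k)) len) (min (min n (i + k + 1) - 1) i)

def Pre_make_rhombus (i : Int) (j : Int) (k : Int) (arr : List (List Int)) (n : Int) : Prop :=
  (∀ x ∈ PySem.List.pyRange (max 0 (i - k)) (min (min n (i + k + 1)) (arr.length : Int)) 1,
      max 0 (j - (k - |x - i|)) < min n (j + (k - |x - i|) + 1) →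
        min n (j + (k - |x - i|) + 1) ≤ ((arr.getD x.toNat []).length : Int))
  ∧ (max (max 0 (i - k)) (arr.length : Int) < min n (i + k + 1) →
      ¬ max 0 (j - (k - |pvX0 i k (arr.length : Int) n - i|))
          < min n (j + (k - |pvX0 i k (arr.length : Int) n - i|) + 1))
instance (i : Int) (j : Int) (k : Int) (arr : List (List Int)) (n : Int) : Decidable (Pre_make_rhombus i j k arr n) := by unfold Pre_make_rhombus; infer_instance

def pvWitness_make_rhombus : Int × Int × Int × List (List Int) × Int := (1, 1, 1, [[1, 2, 3], [4, 5, 6], [7, 8, 9]], 3)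

def Spec_make_rhombus (i : Int) (j : Int) (k : Int) (arr : List (List Int)) (n : Int) (out : Int) : Prop := out = make_rhombus_alt i j k arr n
instance (i : Int) (j : Int) (k : Int) (arr : List (List Int)) (n : Int) (out : Int) : Decidable (Spec_make_rhombus i j k arr n out) := by unfold Spec_make_rhombus; infer_instance

-- ===== CLAIM (what is proved, stated in full; the proofs are below) =====
def Claim_equal_make_rhombus : Prop := ∀ (i : Int) (j : Int) (k : Int) (arr : List (List Int)) (n : Int), Dom_make_rhombus i j k arr n → Pre_make_rhombus i j k arr n → Spec_make_rhombus i j k arr n (make_rhombus i j k arr n)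

-- ===== LEMMAS AND PROOFS =====

-- the closed-form Pre_ yields the per-row fact the proof needs, for every row of the diamond
theorem pv_pre_elim (i j k : Int) (arr : List (List Int)) (n : Int)
    (hpre : Pre_make_rhombus i j k arr n) :
    ∀ x ∈ PySem.List.pyRange (max 0 (i - k)) (min n (i + k + 1)) 1,
      max 0 (j - (k - |x - i|)) < min n (j + (k - |x - i|) + 1) →
        x < (arr.length : Int) ∧
          min n (j + (k - |x - i|) + 1) ≤ ((arr.getD x.toNat []).length : Int) := by
  obtain ⟨h1, h2⟩ := hpre
  intro x hx htouch
  rw [PySem.List.mem_pyRange_one] at hx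
  by_cases hxlen : x < (arr.length : Int)
  · exact ⟨hxlen, h1 x (by rw [PySem.List.mem_pyRange_one]; omega) htouch⟩
  · exfalso
    have hg : max (max 0 (i - k)) (arr.length : Int) < min n (i + k + 1) := by omega
    apply h2 hg
    have hmono : |pvX0 i k (arr.length : Int) n - i| ≤ |x - i| := by
      simp only [pvX0, Int.abs_eq_natAbs]
      omega
    generalize ha : |x - i| = a at htouch hmono
    generalize hb : |pvX0 i k (arr.length : Int) n - i| = b at hmono ⊢
    omega

-- fold of a conditionally-added term = init + sum of the guarded terms
theorem pv_foldl_ite_add {P : Int → Prop} [DecidablePred P] (g : Int → Int) (l : List Int) (init : Int) :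
    l.foldl (fun c t => if P t then c + g t else c) init
      = init + (l.map (fun t => if P t then g t else 0)).sum := by
  induction l generalizing init with
  | nil => simp
  | cons a l ih => simp only [List.foldl_cons, List.map_cons, List.sum_cons, ih]; split <;> ring

-- reindex a shifted range
theorem pv_map_shift (f : Int → Int) (c a b : Int) :
    (PySem.List.pyRange a b 1).map (fun t => f (c + t))
      = (PySem.List.pyRange (c + a) (c + b) 1).map f := by
  simp only [PySem.List.pyRange_one, List.map_map]
  have hb : (c + b - (c + a)).toNat = (b - a).toNat := by omega
  rw [hb]
  exact List.map_congr_left (fun m _ => by simp only [Function.comp_apply]; ring_nf)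

-- A as a sum over absolute coordinates
theorem pv_A_sum (i j k : Int) (arr : List (List Int)) (n : Int) :
    make_rhombus i j k arr n
      = ((PySem.List.pyRange (i - k) (i + k + 1) 1).map (fun x =>
          ((PySem.List.pyRange (j - (k - |x - i|)) (j + (k - |x - i|) + 1) 1).map (fun y =>
            if 0 ≤ x ∧ x < n ∧ 0 ≤ y ∧ y < n then
              PySem.List.pyGetD (PySem.List.pyGetD arr x []) y 0
            else 0)).sum)).sum := by
  unfold make_rhombus
  have hinner : ∀ (dx count : Int),
      (PySem.List.pyRange (-(k - |dx|)) ((k - |dx|) + 1) 1).foldl (fun count dy =>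
        if 0 ≤ i + dx ∧ i + dx < n ∧ 0 ≤ j + dy ∧ j + dy < n then
          count + PySem.List.pyGetD (PySem.List.pyGetD arr (i + dx) []) (j + dy) 0
        else count) count
      = count + ((PySem.List.pyRange (-(k - |dx|)) ((k - |dx|) + 1) 1).map (fun dy =>
          if 0 ≤ i + dx ∧ i + dx < n ∧ 0 ≤ j + dy ∧ j + dy < n then
            PySem.List.pyGetD (PySem.List.pyGetD arr (i + dx) []) (j + dy) 0
          else 0)).sum := by
    intro dx count
    exact pv_foldl_ite_add _ _ _
  simp only [hinner]
  rw [PySem.List.foldl_add, zero_add]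
  rw [show (i - k) = i + (-k) by ring, show (i + k + 1) = i + (k + 1) by ring,
      ← pv_map_shift]
  refine congrArg List.sum (List.map_congr_left fun dx _ => ?_)
  have h1 : i + dx - i = dx := by ring
  rw [h1]
  rw [show (j - (k - |dx|)) = j + (-(k - |dx|)) by ring,
      show (j + (k - |dx|) + 1) = j + ((k - |dx|) + 1) by ring, ← pv_map_shift]

-- the prefix list of a row is the list of its take-sums
theorem pv_prefix_eq (row : List Int) :
    pvPrefixRow row = (List.range (row.length + 1)).map (fun m => (row.take m).sum) := by
  induction row using List.reverseRecOn with
  | nil => simp [pvPrefixRow]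
  | append_singleton l v ih =>
    unfold pvPrefixRow at ih ⊢
    rw [List.foldl_append, List.foldl_cons, List.foldl_nil, ih]
    have hlen : ((List.range (l.length + 1)).map (fun m => (l.take m).sum)).length
        = l.length + 1 := by simp
    have hlast : PySem.List.pyGetD
        ((List.range (l.length + 1)).map (fun m => (l.take m).sum)) (-1) 0 = l.sum := by
      have h1 := PySem.List.pyGetD_neg_natCast
        ((List.range (l.length + 1)).map (fun m => (l.take m).sum)) 1 0
        (by norm_num) (by rw [hlen]; omega)
      norm_num at h1
      rw [h1]
    rw [hlast]
    symm
    rw [show (l ++ [v]).length + 1 = (l.length + 1) + 1 by simp]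
    rw [List.range_succ (n := l.length + 1), List.map_append]
    congr 1
    · refine List.map_congr_left fun m hm => ?_
      rw [List.mem_range] at hm
      rw [List.take_append_of_le_length (by omega)]
    · simp

-- prefix lookup at a nonnegative in-range index
theorem pv_prefix_get (row : List Int) (t : Int) (h0 : 0 ≤ t) (ht : t ≤ (row.length : Int)) :
    PySem.List.pyGetD (pvPrefixRow row) t 0 = (row.take t.toNat).sum := by
  rw [pv_prefix_eq]
  have hlen : ((List.range (row.length + 1)).map (fun m => (row.take m).sum)).length
      = row.length + 1 := by simp
  rw [PySem.List.pyGetD_eq_getElem _ _ h0 (by rw [hlen]; omega)]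
  simp

-- difference of prefix sums = sum of the slice
theorem pv_prefix_diff (row : List Int) (lo hi : Int) (h0 : 0 ≤ lo) (hle : lo ≤ hi)
    (hlen : hi ≤ (row.length : Int)) :
    PySem.List.pyGetD (pvPrefixRow row) hi 0 - PySem.List.pyGetD (pvPrefixRow row) lo 0
      = (PySem.List.slice row (some lo) (some hi)).sum := by
  rw [pv_prefix_get row hi (by omega) hlen, pv_prefix_get row lo h0 (by omega)]
  rw [PySem.List.slice_toNat row h0 (by omega)]
  have hsplit : row.take hi.toNat
      = row.take lo.toNat ++ (row.drop lo.toNat).take (hi.toNat - lo.toNat) := by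
    rw [← List.take_add]
    congr 1
    omega
  rw [hsplit, List.sum_append]
  ring

-- the built table is the map of pvPrefixRow over arr
theorem pv_pref_table (arr : List (List Int)) :
    arr.foldl (fun ps row => ps ++ [pvPrefixRow row]) [] = arr.map pvPrefixRow := by
  rw [PySem.List.foldl_append_singleton_eq_map]
  simp

-- B as a sum over its row range of prefix differences
theorem pv_B_sum (i j k : Int) (arr : List (List Int)) (n : Int) :
    make_rhombus_alt i j k arr n
      = ((PySem.List.pyRange (max 0 (i - k)) (min n (i + k + 1)) 1).map (fun x =>
          if max 0 (j - (k - |x - i|)) < min n (j + (k - |x - i|) + 1) then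
            PySem.List.pyGetD (PySem.List.pyGetD (arr.map pvPrefixRow) x []) (min n (j + (k - |x - i|) + 1)) 0
              - PySem.List.pyGetD (PySem.List.pyGetD (arr.map pvPrefixRow) x []) (max 0 (j - (k - |x - i|))) 0
          else 0)).sum := by
  unfold make_rhombus_alt
  rw [pv_pref_table]
  rw [pv_foldl_ite_add
      (g := fun x => PySem.List.pyGetD (PySem.List.pyGetD (arr.map pvPrefixRow) x []) (min n (j + (k - |x - i|) + 1)) 0
              - PySem.List.pyGetD (PySem.List.pyGetD (arr.map pvPrefixRow) x []) (max 0 (j - (k - |x - i|))) 0), zero_add]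

-- a range of pyGetD's is a slice
theorem pv_map_slice (row : List Int) (lo hi : Int) (h0 : 0 ≤ lo) (hle : lo ≤ hi)
    (hlen : hi ≤ (row.length : Int)) :
    (PySem.List.pyRange lo hi 1).map (fun y => PySem.List.pyGetD row y 0)
      = PySem.List.slice row (some lo) (some hi) := by
  rw [PySem.List.slice_toNat row h0 (le_trans h0 hle)]
  apply List.ext_getElem
  · simp [PySem.List.length_pyRange_one]
    omega
  · intro m hm hm'
    have hmlt : m < (hi - lo).toNat := by
      simpa [PySem.List.length_pyRange_one] using hm
    rw [List.getElem_map, PySem.List.getElem_pyRange_one]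
    have hx0 : 0 ≤ lo + (m : Int) := by omega
    have hxl : lo + (m : Int) < (row.length : Int) := by omega
    rw [PySem.List.pyGetD_eq_getElem row 0 hx0 hxl]
    rw [List.getElem_take, List.getElem_drop]
    congr 1
    omega

-- one row of the diamond: guarded per-cell sum = clamped slice sum
theorem pv_row (arr : List (List Int)) (i j k n x : Int) (hx0 : 0 ≤ x) (hxn : x < n)
    (hpre : max 0 (j - (k - |x - i|)) < min n (j + (k - |x - i|) + 1) →
      x < (arr.length : Int) ∧
        min n (j + (k - |x - i|) + 1) ≤ ((arr.getD x.toNat []).length : Int)) :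
    ((PySem.List.pyRange (j - (k - |x - i|)) (j + (k - |x - i|) + 1) 1).map (fun y =>
        if 0 ≤ x ∧ x < n ∧ 0 ≤ y ∧ y < n then
          PySem.List.pyGetD (PySem.List.pyGetD arr x []) y 0
        else 0)).sum
      = if max 0 (j - (k - |x - i|)) < min n (j + (k - |x - i|) + 1) then
          (PySem.List.slice (PySem.List.pyGetD arr x [])
            (some (max 0 (j - (k - |x - i|)))) (some (min n (j + (k - |x - i|) + 1)))).sum
        else 0 := by
  set rem : Int := k - |x - i| with hrem
  set lo : Int := max 0 (j - rem) with hlo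
  set hi : Int := min n (j + rem + 1) with hhi
  by_cases hc : lo < hi
  · obtain ⟨hxlen, hrowlen⟩ := hpre hc
    have hrow : PySem.List.pyGetD arr x [] = arr.getD x.toNat [] := by
      rw [PySem.List.pyGetD_eq_getElem arr [] hx0 hxlen,
          List.getD_eq_getElem arr [] (by omega)]
    rw [if_pos hc]
    have hsplit1 : PySem.List.pyRange (j - rem) (j + rem + 1) 1
        = PySem.List.pyRange (j - rem) lo 1 ++ PySem.List.pyRange lo (j + rem + 1) 1 :=
      PySem.List.pyRange_one_append _ _ _ (by omega) (by omega)
    have hsplit2 : PySem.List.pyRange lo (j + rem + 1) 1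
        = PySem.List.pyRange lo hi 1 ++ PySem.List.pyRange hi (j + rem + 1) 1 :=
      PySem.List.pyRange_one_append _ _ _ (by omega) (by omega)
    rw [hsplit1, hsplit2, List.map_append, List.map_append, List.sum_append, List.sum_append]
    have hz1 : ((PySem.List.pyRange (j - rem) lo 1).map (fun y =>
        if 0 ≤ x ∧ x < n ∧ 0 ≤ y ∧ y < n then
          PySem.List.pyGetD (PySem.List.pyGetD arr x []) y 0 else 0)).sum = 0 := by
      apply List.sum_eq_zero
      intro v hv
      obtain ⟨y, hy, rfl⟩ := List.mem_map.mp hv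
      rw [PySem.List.mem_pyRange_one] at hy
      rw [if_neg (by omega)]
    have hz2 : ((PySem.List.pyRange hi (j + rem + 1) 1).map (fun y =>
        if 0 ≤ x ∧ x < n ∧ 0 ≤ y ∧ y < n then
          PySem.List.pyGetD (PySem.List.pyGetD arr x []) y 0 else 0)).sum = 0 := by
      apply List.sum_eq_zero
      intro v hv
      obtain ⟨y, hy, rfl⟩ := List.mem_map.mp hv
      rw [PySem.List.mem_pyRange_one] at hy
      rw [if_neg (by omega)]
    rw [hz1, hz2, zero_add, add_zero]
    have hmid : ((PySem.List.pyRange lo hi 1).map (fun y =>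
        if 0 ≤ x ∧ x < n ∧ 0 ≤ y ∧ y < n then
          PySem.List.pyGetD (PySem.List.pyGetD arr x []) y 0 else 0))
        = (PySem.List.pyRange lo hi 1).map (fun y =>
            PySem.List.pyGetD (PySem.List.pyGetD arr x []) y 0) := by
      refine List.map_congr_left fun y hy => ?_
      rw [PySem.List.mem_pyRange_one] at hy
      rw [if_pos (by omega)]
    rw [hmid]
    rw [pv_map_slice _ _ _ (by omega) (le_of_lt hc) (by rw [hrow]; omega)]
  · rw [if_neg hc]
    apply List.sum_eq_zero
    intro v hv
    obtain ⟨y, hy, rfl⟩ := List.mem_map.mp hv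
    rw [PySem.List.mem_pyRange_one] at hy
    rw [if_neg (by omega)]

-- B's per-row prefix difference = the clamped slice sum, under Pre_'s row condition
theorem pv_row_B (arr : List (List Int)) (i j k n x : Int) (hx0 : 0 ≤ x) (_hxn : x < n)
    (hpre : max 0 (j - (k - |x - i|)) < min n (j + (k - |x - i|) + 1) →
      x < (arr.length : Int) ∧
        min n (j + (k - |x - i|) + 1) ≤ ((arr.getD x.toNat []).length : Int)) :
    (if max 0 (j - (k - |x - i|)) < min n (j + (k - |x - i|) + 1) then
        PySem.List.pyGetD (PySem.List.pyGetD (arr.map pvPrefixRow) x []) (min n (j + (k - |x - i|) + 1)) 0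
          - PySem.List.pyGetD (PySem.List.pyGetD (arr.map pvPrefixRow) x []) (max 0 (j - (k - |x - i|))) 0
      else 0)
      = if max 0 (j - (k - |x - i|)) < min n (j + (k - |x - i|) + 1) then
          (PySem.List.slice (PySem.List.pyGetD arr x [])
            (some (max 0 (j - (k - |x - i|)))) (some (min n (j + (k - |x - i|) + 1)))).sum
        else 0 := by
  set rem : Int := k - |x - i|
  set lo : Int := max 0 (j - rem)
  set hi : Int := min n (j + rem + 1)
  by_cases hc : lo < hi
  · obtain ⟨hxlen, hrowlen⟩ := hpre hc
    rw [if_pos hc, if_pos hc]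
    have hrow : PySem.List.pyGetD arr x [] = arr.getD x.toNat [] := by
      rw [PySem.List.pyGetD_eq_getElem arr [] hx0 hxlen,
          List.getD_eq_getElem arr [] (by omega)]
    have hprefrow : PySem.List.pyGetD (arr.map pvPrefixRow) x []
        = pvPrefixRow (arr.getD x.toNat []) := by
      rw [PySem.List.pyGetD_eq_getElem (arr.map pvPrefixRow) [] hx0 (by simp; omega)]
      rw [List.getElem_map, List.getD_eq_getElem arr [] (by omega)]
    rw [hprefrow, hrow]
    exact pv_prefix_diff _ _ _ (by omega) (le_of_lt hc) (by omega)
  · rw [if_neg hc, if_neg hc]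

-- ===== VERDICT (by name: the statement is the Claim_ definition above) =====
theorem make_rhombus_spec : Claim_equal_make_rhombus := by
  intro i j k arr n _hdom hpre
  unfold Spec_make_rhombus
  rw [pv_A_sum, pv_B_sum]
  set L : Int := max 0 (i - k) with hL
  set H : Int := min n (i + k + 1) with hH
  by_cases hLH : L ≤ H
  · have hsplit1 : PySem.List.pyRange (i - k) (i + k + 1) 1
        = PySem.List.pyRange (i - k) L 1 ++ PySem.List.pyRange L (i + k + 1) 1 :=
      PySem.List.pyRange_one_append _ _ _ (by omega) (by omega)
    have hsplit2 : PySem.List.pyRange L (i + k + 1) 1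
        = PySem.List.pyRange L H 1 ++ PySem.List.pyRange H (i + k + 1) 1 :=
      PySem.List.pyRange_one_append _ _ _ (by omega) (by omega)
    rw [hsplit1, hsplit2, List.map_append, List.map_append, List.sum_append, List.sum_append]
    have hzrow : ∀ x : Int, ¬ (0 ≤ x ∧ x < n) →
        ((PySem.List.pyRange (j - (k - |x - i|)) (j + (k - |x - i|) + 1) 1).map (fun y =>
          if 0 ≤ x ∧ x < n ∧ 0 ≤ y ∧ y < n then
            PySem.List.pyGetD (PySem.List.pyGetD arr x []) y 0 else 0)).sum = 0 := by
      intro x hx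
      apply List.sum_eq_zero
      intro v hv
      obtain ⟨y, _, rfl⟩ := List.mem_map.mp hv
      rw [if_neg (by tauto)]
    have hz1 : ((PySem.List.pyRange (i - k) L 1).map (fun x =>
        ((PySem.List.pyRange (j - (k - |x - i|)) (j + (k - |x - i|) + 1) 1).map (fun y =>
          if 0 ≤ x ∧ x < n ∧ 0 ≤ y ∧ y < n then
            PySem.List.pyGetD (PySem.List.pyGetD arr x []) y 0 else 0)).sum)).sum = 0 := by
      apply List.sum_eq_zero
      intro v hv
      obtain ⟨x, hx, rfl⟩ := List.mem_map.mp hv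
      rw [PySem.List.mem_pyRange_one] at hx
      exact hzrow x (by omega)
    have hz2 : ((PySem.List.pyRange H (i + k + 1) 1).map (fun x =>
        ((PySem.List.pyRange (j - (k - |x - i|)) (j + (k - |x - i|) + 1) 1).map (fun y =>
          if 0 ≤ x ∧ x < n ∧ 0 ≤ y ∧ y < n then
            PySem.List.pyGetD (PySem.List.pyGetD arr x []) y 0 else 0)).sum)).sum = 0 := by
      apply List.sum_eq_zero
      intro v hv
      obtain ⟨x, hx, rfl⟩ := List.mem_map.mp hv
      rw [PySem.List.mem_pyRange_one] at hx
      exact hzrow x (by omega)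
    rw [hz1, hz2, zero_add, add_zero]
    refine congrArg List.sum (List.map_congr_left fun x hx => ?_)
    have hx' := hx
    rw [PySem.List.mem_pyRange_one] at hx'
    rw [pv_row arr i j k n x (by omega) (by omega) (pv_pre_elim i j k arr n hpre x hx)]
    exact (pv_row_B arr i j k n x (by omega) (by omega) (pv_pre_elim i j k arr n hpre x hx)).symm
  · have hA : PySem.List.pyRange L H 1 = [] := PySem.List.pyRange_one_eq_nil (by omega)
    rw [hA, List.map_nil, List.sum_nil]
    apply List.sum_eq_zero
    intro v hv
    obtain ⟨x, hx, rfl⟩ := List.mem_map.mp hv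
    rw [PySem.List.mem_pyRange_one] at hx
    apply List.sum_eq_zero
    intro v hv'
    obtain ⟨y, _, rfl⟩ := List.mem_map.mp hv'
    rw [if_neg (by omega)]
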